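-- pv_equiv track=rewrite | github.com/Rishiraj-S/akaike_internship_assignment | utils.py | extract_common_topics
-- ===== SOURCE A (Python) =====
-- def extract_common_topics(articles):
--     """
--     Extracts common topics present in all articles.
--
--     Args:
--         articles (list): List of dictionaries, each containing article details.
--
--     Returns:
--         set: A set of common topics. Returns None if no common topics exist.
--     """
--     if not articles:
--         return None
--
--     # Extract the topics from each article
--     topics_lists = [article["topics"] for article in articles]
--
--     # Find the common topics
--     common_topics = set(topics_lists[0]).intersection(*topics_lists[1:])
--
--     if len(common_topics) == 0:
--         return None
--     return common_topics
-- ===== SOURCE B (Python) =====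
-- def extract_common_topics(articles):
--     """Same result as A via a single counting pass: count per-article (deduped)
--     topic presence, then keep the topics counted in every article."""
--     if not articles:
--         return None
--     counts = {}
--     for article in articles:
--         for topic in set(article["topics"]):
--             counts[topic] = counts.get(topic, 0) + 1
--     common = {t for t, c in counts.items() if c == len(articles)}
--     if not common:
--         return None
--     return common
-- ===== Notes on version B (the rewrite author's own statement) =====
-- stated objective: alternative
-- what changed: Replaces building all topic lists and a variadic set intersection with a single pass that counts per-article topic presence in a dict and keeps topics whose count equals the number of articles.
import Mathlib
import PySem

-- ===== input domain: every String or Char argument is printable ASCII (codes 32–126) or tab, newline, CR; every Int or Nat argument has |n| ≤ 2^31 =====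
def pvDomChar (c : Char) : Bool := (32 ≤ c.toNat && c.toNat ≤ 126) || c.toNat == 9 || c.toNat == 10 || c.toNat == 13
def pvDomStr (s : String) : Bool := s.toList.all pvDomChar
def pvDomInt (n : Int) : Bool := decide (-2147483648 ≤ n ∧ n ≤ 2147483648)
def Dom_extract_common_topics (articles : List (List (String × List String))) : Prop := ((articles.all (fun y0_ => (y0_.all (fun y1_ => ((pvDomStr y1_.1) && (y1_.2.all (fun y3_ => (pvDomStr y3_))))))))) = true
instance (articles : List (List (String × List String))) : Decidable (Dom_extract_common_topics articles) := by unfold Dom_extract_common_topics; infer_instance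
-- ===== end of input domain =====

-- B replaces the list-of-lists + variadic set intersection with one counting pass over
-- per-article deduplicated topics (count == number of articles ⇔ common); same cost.
-- Both versions raise KeyError when an article lacks the "topics" key; Pre_ excludes that.

-- ===== PORT A =====
-- article["topics"]  (Pre_ guarantees the key is present, so the default is never used)
def pvTopicsOf (article : List (String × List String)) : List String :=
  (PySem.Dict.mk article).getD "topics" []

def extract_common_topics (articles : List (List (String × List String))) : Option (List String) :=
  if articles.isEmpty then none
  else
    let topics_lists := articles.map pvTopicsOf
    -- set(topics_lists[0]).intersection(*topics_lists[1:])
    let common := (topics_lists.drop 1).foldl PySem.Set.inter (PySem.Set.ofList (topics_lists.headD []))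
    if common.length = 0 then none else some common

-- ===== PORT B =====
def extract_common_topics_alt (articles : List (List (String × List String))) : Option (List String) :=
  if articles.isEmpty then none
  else
    let counts : PySem.Dict String Int := articles.foldl (fun d article =>
      (PySem.Set.ofList (pvTopicsOf article)).foldl
        (fun d topic => d.insert topic (d.getD topic 0 + 1)) d) PySem.Dict.empty
    let common : PySem.Set String :=
      (counts.items.filter (fun p => p.2 == (articles.length : Int))).map Prod.fst
    if common.isEmpty then none else some common

-- ===== PRECONDITION & SPEC =====
-- Pre_ excludes exactly the inputs on which the Python raises KeyError: an article without a "topics" key.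
def Pre_extract_common_topics (articles : List (List (String × List String))) : Prop :=
  articles.all (fun article => (PySem.Dict.mk article).contains "topics") = true
instance (articles : List (List (String × List String))) : Decidable (Pre_extract_common_topics articles) := by unfold Pre_extract_common_topics; infer_instance

def pvWitness_extract_common_topics : (List (List (String × List String))) :=
  [[("topics", ["ai", "ml"])], [("topics", ["ml"])]]

def Spec_extract_common_topics (articles : List (List (String × List String))) (out : Option (List String)) : Prop := out = extract_common_topics_alt articles
instance (articles : List (List (String × List String))) (out : Option (List String)) : Decidable (Spec_extract_common_topics articles out) := by unfold Spec_extract_common_topics; infer_instance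

-- ===== CLAIM (what is proved, stated in full; the proofs are below) =====
def Claim_equal_extract_common_topics : Prop := ∀ (articles : List (List (String × List String))), Dom_extract_common_topics articles → Pre_extract_common_topics articles → Spec_extract_common_topics articles (extract_common_topics articles)

-- ===== LEMMAS AND PROOFS =====

-- A's variadic intersection as a filter of the first set.
theorem foldl_inter_eq_filter {α : Type} [BEq α] (ls : List (List α)) (s : PySem.Set α) :
    ls.foldl PySem.Set.inter s = s.filter (fun x => ls.all (fun l => l.contains x)) := by
  induction ls generalizing s with
  | nil => simp
  | cons l ls ih =>
    simp only [List.foldl_cons, ih, PySem.Set.inter, List.filter_filter, List.all_cons]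
    exact List.filter_congr (fun x _ => by simp [PySem.Set.contains, Bool.and_comm])

-- elements Set.update appends are new; a predicate implying old membership ignores them
theorem filter_update {α : Type} [BEq α] [LawfulBEq α] (p : α → Bool) (v : List α)
    (s : PySem.Set α) (h : ∀ k, p k = true → k ∈ s) :
    (PySem.Set.update s v).filter p = s.filter p := by
  induction v generalizing s with
  | nil => rfl
  | cons x v ih =>
    show (PySem.Set.update (PySem.Set.add s x) v).filter p = _
    by_cases hx : s.contains x = true
    · rw [show PySem.Set.add s x = s from if_pos hx]
      exact ih s h
    · rw [show PySem.Set.add s x = s ++ [x] from if_neg hx]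
      rw [ih (s ++ [x]) (fun k hk => List.mem_append_left _ (h k hk))]
      have hpx : p x = false := by
        by_contra hc
        exact hx (by simp [PySem.Set.contains, h x (by simpa using hc)])
      simp [List.filter_append, hpx]

theorem ofList_append {α : Type} [BEq α] (u v : List α) :
    PySem.Set.ofList (u ++ v) = PySem.Set.update (PySem.Set.ofList u) v := by
  simp [PySem.Set.ofList, PySem.Set.update, List.foldl_append]

theorem count_ofList {α : Type} [BEq α] [LawfulBEq α] (t : List α) (k : α) :
    (PySem.Set.ofList t).count k = if k ∈ t then 1 else 0 := by
  by_cases h : k ∈ t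
  · have hm : k ∈ PySem.Set.ofList t := (PySem.Set.mem_ofList t k).2 h
    have h1 := (List.nodup_iff_count_le_one.1 (PySem.Set.nodup_ofList t)) k
    have h2 := List.count_pos_iff.2 hm
    rw [if_pos h]; omega
  · simp [h, List.count_eq_zero, PySem.Set.mem_ofList]

-- count of k in the flattened deduplicated lists = number of lists containing k
theorem count_flatten_ofList {α : Type} [BEq α] [LawfulBEq α] (lss : List (List α)) (k : α) :
    ((lss.map (fun l => PySem.Set.ofList l)).flatten).count k
      = lss.countP (fun l => l.contains k) := by
  induction lss with
  | nil => rfl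
  | cons l lss ih =>
    simp only [List.map_cons, List.flatten_cons, List.count_append, ih, List.countP_cons,
      count_ofList]
    by_cases h : k ∈ l <;> simp [h, Nat.add_comm]

-- ofList of a duplicate-free list is the list itself
theorem ofList_of_nodup {α : Type} [BEq α] [LawfulBEq α] (l : List α) (h : l.Nodup) :
    PySem.Set.ofList l = l := by
  induction l using List.reverseRecOn with
  | nil => rfl
  | append_singleton l x ih =>
    have hx : x ∉ l := fun hm =>
      (List.disjoint_of_nodup_append h) hm (List.mem_singleton.mpr rfl)
    have hnd : l.Nodup := h.sublist (List.sublist_append_left l [x])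
    rw [ofList_append, ih hnd]
    show PySem.Set.add l x = l ++ [x]
    rw [PySem.Set.add, if_neg (by simpa [PySem.Set.contains] using hx)]

-- ===== VERDICT (by name: the statement is the Claim_ definition above) =====
theorem extract_common_topics_spec : Claim_equal_extract_common_topics := by
  intro articles _ _
  unfold Spec_extract_common_topics extract_common_topics extract_common_topics_alt
  cases articles with
  | nil => rfl
  | cons a0 rest =>
    simp only [List.isEmpty_cons, Bool.false_eq_true, if_false]
    set t0 := pvTopicsOf a0 with ht0
    set ls := rest.map pvTopicsOf with hls
    set n : Int := ((a0 :: rest).length : Int) with hn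
    set xs := (((a0 :: rest).map pvTopicsOf).map (fun l => PySem.Set.ofList l)).flatten with hxs
    -- B's counting loop is Counter over the flattened deduplicated topic lists
    have hcounts : (a0 :: rest).foldl (fun d article =>
        (PySem.Set.ofList (pvTopicsOf article)).foldl
          (fun d topic => d.insert topic (d.getD topic 0 + 1)) d) PySem.Dict.empty
        = PySem.Dict.counter xs := by
      rw [hxs, ← PySem.Dict.foldl_insert_getD_add_one_eq_counter, List.foldl_flatten,
        List.foldl_map, List.foldl_map]
    have hcnt : ∀ k, xs.count k = (t0 :: ls).countP (fun l => decide (k ∈ l)) := by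
      intro k
      rw [hxs, count_flatten_ofList]
      simp [ht0, hls]
    have hAcom : (((a0 :: rest).map pvTopicsOf).drop 1).foldl PySem.Set.inter
        (PySem.Set.ofList (((a0 :: rest).map pvTopicsOf).headD []))
        = (PySem.Set.ofList t0).filter (fun x => ls.all (fun l => l.contains x)) := by
      rw [foldl_inter_eq_filter]; rfl
    have hBcom : ((PySem.Dict.counter xs).items.filter
          (fun p => p.2 == n)).map Prod.fst
        = (PySem.Set.ofList xs).filter (fun k => ((xs.count k : Int) == n)) := by
      rw [PySem.Dict.items_counter, List.filter_map, List.map_map]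
      simp [Function.comp_def]
    have hkey : ∀ k, ((xs.count k : Int) == n) = true → k ∈ PySem.Set.ofList t0 := by
      intro k hk
      rw [PySem.Set.mem_ofList]
      by_contra hkt
      have := hcnt k
      have hlen : ls.countP (fun l => decide (k ∈ l)) ≤ ls.length := List.countP_le_length
      have hlsl : ls.length = rest.length := by rw [hls, List.length_map]
      have hk' : (xs.count k : Int) = n := by simpa using hk
      have hc0 : (t0 :: ls).countP (fun l => decide (k ∈ l))
          = ls.countP (fun l => decide (k ∈ l)) := by simp [hkt]
      have hlc : (a0 :: rest).length = rest.length + 1 := List.length_cons ..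
      rw [hcnt k, hc0, hn, hlc] at hk'
      omega
    have hxs_split : PySem.Set.ofList xs
        = PySem.Set.update (PySem.Set.ofList t0)
            ((ls.map (fun l => PySem.Set.ofList l)).flatten) := by
      rw [hxs]
      simp only [List.map_cons, List.flatten_cons, ← ht0, ← hls]
      rw [ofList_append, ofList_of_nodup _ (PySem.Set.nodup_ofList t0)]
    have hcom : (PySem.Set.ofList xs).filter (fun k => ((xs.count k : Int) == n))
        = (PySem.Set.ofList t0).filter (fun x => ls.all (fun l => l.contains x)) := by
      rw [hxs_split, filter_update _ _ _ hkey]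
      refine List.filter_congr (fun k hkmem => ?_)
      have hkt : k ∈ t0 := (PySem.Set.mem_ofList t0 k).1 hkmem
      have hcons : (t0 :: ls).countP (fun l => decide (k ∈ l))
          = ls.countP (fun l => decide (k ∈ l)) + 1 := by
        simp [hkt]
      have hlen : ls.countP (fun l => decide (k ∈ l)) ≤ ls.length := List.countP_le_length
      have hlsl : ls.length = rest.length := by rw [hls, List.length_map]
      by_cases hall : ls.all (fun l => l.contains k) = true
      · have hcl : ls.countP (fun l => decide (k ∈ l)) = ls.length :=
          List.countP_eq_length.2 (by intro l hl; simpa using (List.all_eq_true.1 hall) l hl)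
        rw [hall]
        have hlc : (a0 :: rest).length = rest.length + 1 := List.length_cons ..
        simp only [hcnt k, hcons, hcl, hn, hlc, beq_iff_eq]
        push_cast
        omega
      · have hne : ls.countP (fun l => decide (k ∈ l)) ≠ ls.length := by
          intro he
          exact hall (List.all_eq_true.2 (fun l hl =>
            List.contains_iff_mem.mpr (of_decide_eq_true (List.countP_eq_length.1 he l hl))))
        rw [eq_false_of_ne_true hall]
        have hlc : (a0 :: rest).length = rest.length + 1 := List.length_cons ..
        simp only [hcnt k, hcons, hn, hlc, beq_eq_false_iff_ne, ne_eq]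
        push_cast
        omega
    rw [hcounts, hBcom, hcom, hAcom]
    rcases (PySem.Set.ofList t0).filter (fun x => ls.all (fun l => l.contains x)) with _ | ⟨c, cs⟩ <;> simp
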